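-- pv_equiv track=rewrite | github.com/Chukwukwadorom/Data_structure_and_algorithms_exercises | multiple_pointers.py | countUniqueValues_multi_pointer
-- ===== SOURCE A (Python) =====
-- def countUniqueValues_multi_pointer(lst):
--     """count unique values using pointer, altering the list. time complexity:O(N)
--     this method presupposes that the list is sorted
--     """
--     i = 0
--     j =  1
--     if len(lst) == 0:
--         return 0
--
--     while j != len(lst):
--       if lst[i] != lst[j]:
--           i += 1
--           lst[i] = lst[j]
--       j += 1
--     return i+1, lst[:i+1]
-- ===== SOURCE B (Python) =====
-- def countUniqueValues_multi_pointer(lst):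
--     # Staged boundary-mask compression: position 0 is always a boundary; position
--     # i>0 is a boundary iff lst[i] != lst[i-1].  Compress lst through the mask.
--     keep = [True] + [a != b for a, b in zip(lst, lst[1:])]
--     uniq = [x for x, k in zip(lst, keep) if k]
--     return (len(uniq), uniq)
-- ===== Notes on version B (the rewrite author's own statement) =====
-- stated objective: alternative
-- what changed: Replaces the two-pointer in-place front-overwrite with a staged boundary-mask compression: first a pairwise zip of lst with its own tail builds a boolean change-point mask, then a second comprehension compresses lst through that mask (no accumulator comparison, no per-element index assignment, no mutation of the input; the zip/comprehension passes run faster than A's indexed while loop by a constant factor); Pre_ excludes the empty list, where A returns the bare int 0 instead of a (count, list) tuple.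
-- outside the precondition, e.g. on countUniqueValues_multi_pointer([]): A returns 0, B returns (0, [])
import Mathlib
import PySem

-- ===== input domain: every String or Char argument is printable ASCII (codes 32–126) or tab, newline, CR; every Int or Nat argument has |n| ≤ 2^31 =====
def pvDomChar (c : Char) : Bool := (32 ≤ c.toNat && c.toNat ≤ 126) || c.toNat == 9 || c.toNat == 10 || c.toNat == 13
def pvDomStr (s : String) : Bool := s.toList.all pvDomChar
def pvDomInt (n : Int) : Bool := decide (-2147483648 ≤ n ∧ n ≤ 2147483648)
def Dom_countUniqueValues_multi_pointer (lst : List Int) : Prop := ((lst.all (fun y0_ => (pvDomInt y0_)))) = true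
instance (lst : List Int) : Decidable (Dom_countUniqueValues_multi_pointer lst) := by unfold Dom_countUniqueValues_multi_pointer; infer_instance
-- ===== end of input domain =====

-- B replaces A's two-pointer in-place front-overwrite with a staged boundary-mask
-- compression (pairwise zip mask, then compress); equivalence is about the RETURN
-- value only: A mutates lst in place, B does not mutate its argument.

-- ===== PORT A =====
-- the while loop: state (i, current list l); j walks to len(lst)
def pvALoop (l : List Int) (i j : Nat) : Nat × List Int :=
  if _h : j < l.length then
    if l.getD i 0 ≠ l.getD j 0 then
      pvALoop (l.set (i+1) (l.getD j 0)) (i+1) (j+1)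
    else
      pvALoop l i (j+1)
  else (i, l)
termination_by l.length - j
decreasing_by
  · simp only [List.length_set]; omega
  · omega

def countUniqueValues_multi_pointer (lst : List Int) : Int × List Int :=
  if lst.length = 0 then (0, [])  -- A returns the bare int 0 here (not a tuple); excluded by Pre_
  else
    let r := pvALoop lst 0 1
    (((r.1 : Int) + 1), r.2.take (r.1 + 1))

-- ===== PORT B =====
-- [a != b for a, b in zip(lst, lst[1:])]
def pvAdjMask (lst : List Int) : List Bool :=
  (lst.zip lst.tail).map (fun p => decide (p.1 ≠ p.2))

def countUniqueValues_multi_pointer_alt (lst : List Int) : Int × List Int :=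
  let keep := true :: pvAdjMask lst
  let uniq := ((lst.zip keep).filter (fun p => p.2)).map (fun p => p.1)
  ((uniq.length : Int), uniq)

-- ===== PRECONDITION & SPEC =====
-- Pre_ excludes only the empty list, on which A returns the bare int 0, a value
-- outside the declared return type Int × List Int.
def Pre_countUniqueValues_multi_pointer (lst : List Int) : Prop := lst ≠ []
instance (lst : List Int) : Decidable (Pre_countUniqueValues_multi_pointer lst) := by
  unfold Pre_countUniqueValues_multi_pointer; infer_instance

def pvWitness_countUniqueValues_multi_pointer : List Int := [1, 1, 2]

def Spec_countUniqueValues_multi_pointer (lst : List Int) (out : Int × List Int) : Prop := out = countUniqueValues_multi_pointer_alt lst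
instance (lst : List Int) (out : Int × List Int) : Decidable (Spec_countUniqueValues_multi_pointer lst out) := by unfold Spec_countUniqueValues_multi_pointer; infer_instance

-- ===== CLAIM (what is proved, stated in full; the proofs are below) =====
def Claim_equal_countUniqueValues_multi_pointer : Prop := ∀ (lst : List Int), Dom_countUniqueValues_multi_pointer lst → Pre_countUniqueValues_multi_pointer lst → Spec_countUniqueValues_multi_pointer lst (countUniqueValues_multi_pointer lst)

-- ===== LEMMAS AND PROOFS =====

-- proof-only helpers: a left-fold dedup step and the "tail dedup after a" function
def pvStep (u : List Int) (x : Int) : List Int :=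
  if u = [] ∨ u.getLast? ≠ some x then u ++ [x] else u

def pvTdd (a : Int) : List Int → List Int
  | [] => []
  | x :: rest => if x = a then pvTdd a rest else x :: pvTdd x rest

lemma pvStep_eq_of_last (u : List Int) (x : Int) (h : u.getLast? = some x) :
    pvStep u x = u := by
  unfold pvStep
  have hne : u ≠ [] := by intro he; simp [he] at h
  simp [hne, h]

lemma pvStep_eq_of_ne (u : List Int) (x : Int) (h : u.getLast? ≠ some x) :
    pvStep u x = u ++ [x] := by
  unfold pvStep
  by_cases he : u = [] <;> simp [he, h]

lemma foldl_pvStep_append (xs : List Int) (x : Int) :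
    (xs ++ [x]).foldl pvStep [] = pvStep (xs.foldl pvStep []) x := by
  simp [List.foldl_append]

-- the left fold from a nonempty accumulator is the accumulator ++ tail dedup
lemma foldl_pvStep_tdd : ∀ (l : List Int) (u : List Int) (a : Int),
    u.getLast? = some a → l.foldl pvStep u = u ++ pvTdd a l := by
  intro l
  induction l with
  | nil => intro u a _; simp [pvTdd]
  | cons x rest ih =>
    intro u a hlast
    by_cases hxa : x = a
    · subst hxa
      have hstep : pvStep u x = u := pvStep_eq_of_last u x hlast
      rw [List.foldl_cons, hstep, ih u x hlast]
      simp [pvTdd]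
    · have hstep : pvStep u x = u ++ [x] := by
        apply pvStep_eq_of_ne
        rw [hlast]; intro hc
        exact hxa (Option.some.inj hc).symm
      rw [List.foldl_cons, hstep, ih (u ++ [x]) x (by simp)]
      simp [pvTdd, hxa]

-- the mask compression relative to a previous value a is the tail dedup
lemma mask_tdd : ∀ (l : List Int) (a : Int),
    ((l.zip (pvAdjMask (a :: l))).filter (fun p => p.2)).map (fun p => p.1)
      = pvTdd a l := by
  intro l
  induction l with
  | nil => intro a; simp [pvAdjMask, pvTdd]
  | cons y r ih =>
    intro a
    have hmask : pvAdjMask (a :: y :: r) = decide (a ≠ y) :: pvAdjMask (y :: r) := by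
      simp [pvAdjMask]
    rw [hmask]
    by_cases hay : y = a
    · subst hay
      simp only [ne_eq, not_true_eq_false, decide_false, List.zip_cons_cons, List.filter_cons]
      simpa [pvTdd] using ih y
    · have hd : decide (a ≠ y) = true := by
        simp only [decide_eq_true_eq]; exact fun h => hay h.symm
      rw [hd]
      simp only [List.zip_cons_cons, List.filter_cons]
      simp [pvTdd, hay, ih y]

-- B's uniq on x :: rest is x :: tail dedup
lemma alt_eq (x : Int) (rest : List Int) :
    countUniqueValues_multi_pointer_alt (x :: rest)
      = (((x :: pvTdd x rest).length : Int), x :: pvTdd x rest) := by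
  unfold countUniqueValues_multi_pointer_alt
  simp [mask_tdd rest x]

-- A's fold result
lemma fold_eq (x : Int) (rest : List Int) :
    (x :: rest).foldl pvStep [] = x :: pvTdd x rest := by
  have h0 : pvStep [] x = [x] := by simp [pvStep]
  simp only [List.foldl_cons, h0]
  rw [foldl_pvStep_tdd rest [x] x (by simp)]
  rfl

-- the loop invariant: pvALoop's final (i, l) has l.take (i+1) = the dedup fold of lst
lemma pvALoop_inv (lst : List Int) :
    ∀ (n : Nat) (l : List Int) (i j : Nat),
      lst.length - j = n → j ≤ lst.length → i < j →
      l.length = lst.length →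
      l.take (i+1) = (lst.take j).foldl pvStep [] →
      i + 1 = ((lst.take j).foldl pvStep []).length →
      l.drop j = lst.drop j →
      (pvALoop l i j).1 + 1 = (lst.foldl pvStep []).length ∧
      (pvALoop l i j).2.take ((pvALoop l i j).1 + 1) = lst.foldl pvStep [] := by
  intro n
  induction n with
  | zero =>
    intro l i j hn hj hij hlen htake hcount hdrop
    have hj' : j = lst.length := by omega
    rw [pvALoop]
    have : ¬ j < l.length := by omega
    simp only [this, dif_neg, not_false_iff]
    subst hj'
    simp only [List.take_length] at htake hcount
    exact ⟨hcount, htake⟩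
  | succ n ih =>
    intro l i j hn hj hij hlen htake hcount hdrop
    have hjlt : j < lst.length := by omega
    have hjl : j < l.length := by omega
    have hil : i < l.length := by omega
    have hgetj : l.getD j 0 = lst.getD j 0 := by
      have h1 : l[j]? = (l.drop j)[0]? := by
        simp [List.getElem?_drop]
      have h2 : lst[j]? = (lst.drop j)[0]? := by
        simp [List.getElem?_drop]
      simp only [List.getD]
      rw [h1, h2, hdrop]
    have htakesucc : l.take (i+1) = l.take i ++ [l.getD i 0] := by
      rw [List.take_add_one]
      congr 1
      simp [List.getD, List.getElem?_eq_getElem hil]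
    have hlast : ((lst.take j).foldl pvStep []).getLast? = some (l.getD i 0) := by
      rw [← htake, htakesucc]
      simp
    have htakej : lst.take (j+1) = lst.take j ++ [lst.getD j 0] := by
      rw [List.take_add_one]
      congr 1
      simp [List.getD, List.getElem?_eq_getElem hjlt]
    have hdropsucc : l.drop (j+1) = lst.drop (j+1) := by
      have h1 : l.drop (j+1) = (l.drop j).drop 1 := by
        rw [List.drop_drop]
      have h2 : lst.drop (j+1) = (lst.drop j).drop 1 := by
        rw [List.drop_drop]
      rw [h1, h2, hdrop]
    rw [pvALoop]
    simp only [hjl, dif_pos]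
    by_cases hne : l.getD i 0 = l.getD j 0
    · simp only [hne, ne_eq, not_true_eq_false]
      have hfold : (lst.take (j+1)).foldl pvStep [] = (lst.take j).foldl pvStep [] := by
        rw [htakej, foldl_pvStep_append]
        apply pvStep_eq_of_last
        rw [hlast, hne, hgetj]
      have := ih l i (j+1) (by omega) (by omega) (by omega) hlen
        (by rw [hfold]; exact htake) (by rw [hfold]; exact hcount)
        hdropsucc
      simpa using this
    · simp only [ne_eq, hne, not_false_iff, if_pos]
      set v := l.getD j 0 with hv
      have hi1 : i + 1 < l.length := by omega
      have hfold : (lst.take (j+1)).foldl pvStep []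
          = (lst.take j).foldl pvStep [] ++ [v] := by
        rw [htakej, foldl_pvStep_append]
        rw [pvStep_eq_of_ne, hgetj]
        rw [hlast, ← hgetj]
        intro hc
        exact hne (Option.some.injEq _ _ ▸ (by simpa using hc))
      have hsettake : (l.set (i+1) v).take (i+2) = l.take (i+1) ++ [v] := by
        rw [List.take_add_one]
        congr 1
        · rw [List.take_set_of_le]; omega
        · simp [hi1]
      have hsetdrop : (l.set (i+1) v).drop (j+1) = lst.drop (j+1) := by
        rw [List.drop_set_of_lt (by omega : i + 1 < j + 1)]
        exact hdropsucc
      have := ih (l.set (i+1) v) (i+1) (j+1) (by omega) (by omega) (by omega)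
        (by simp [hlen])
        (by rw [hsettake, htake, hfold])
        (by rw [hfold]; simp [← hcount])
        hsetdrop
      simpa using this

-- ===== VERDICT (by name: the statement is the Claim_ definition above) =====
theorem countUniqueValues_multi_pointer_spec : Claim_equal_countUniqueValues_multi_pointer := by
  intro lst _hdom hpre
  unfold Spec_countUniqueValues_multi_pointer
  have hne : lst.length ≠ 0 := by
    intro h; exact hpre (List.eq_nil_of_length_eq_zero h)
  obtain ⟨x, rest, rfl⟩ := List.exists_cons_of_ne_nil hpre
  unfold countUniqueValues_multi_pointer
  simp only [hne, if_neg, not_false_iff]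
  have hinit_take : (x :: rest).take 1 = ((x :: rest).take 1).foldl pvStep [] := by
    simp [pvStep]
  have h := pvALoop_inv (x :: rest) ((x :: rest).length - 1) (x :: rest) 0 1
    rfl (by simp) (by omega) rfl
    (by simpa using hinit_take)
    (by simp [pvStep])
    rfl
  obtain ⟨h1, h2⟩ := h
  rw [fold_eq] at h1 h2
  rw [alt_eq]
  refine Prod.ext ?_ ?_
  · simp only
    rw [← h1]; push_cast; ring
  · simpa using h2
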